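-- pv_equiv track=rewrite | github.com/pjz2000/sideguy-solutions | tools/auto-builder/auto_builder.py | related_slugs
-- ===== SOURCE A (Python) =====
-- STOP={"san","diego","for","to","the","a","an","of","in","is","how","do","i","my",
--       "near","me","so","why","what","when","get","be","not","are","with","on","at"}
--
-- def keywords(slug):
--     return [w for w in slug.split("-") if len(w)>2 and w not in STOP]
--
-- def related_slugs(slug, pool, n=5):
--     kw=set(keywords(slug))
--     if not kw:
--         return pool[:n]
--     scored=[]
--     for s in pool:
--         if s==slug:
--             continue
--         overlap=len(kw & set(keywords(s)))
--         if overlap>0: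
--             scored.append((overlap,s))
--     scored.sort(key=lambda x:-x[0])
--     # deduplicate by first token (topic root) to keep variety
--     seen=set()
--     result=[]
--     for _,s in scored:
--         root=s.split("-")[0]
--         if root not in seen:
--             seen.add(root)
--             result.append(s)
--         if len(result)>=n:
--             break
--     # fallback: fill from top of pool if not enough
--     if len(result)<n:
--         for s in pool:
--             if s not in result and s!=slug:
--                 result.append(s)
--             if len(result)>=n:
--                 break
--     return result
-- ===== SOURCE B (Python) =====
-- STOP={"san","diego","for","to","the","a","an","of","in","is","how","do","i","my",
--       "near","me","so","why","what","when","get","be","not","are","with","on","at"}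
--
-- def keywords(slug):
--     return [w for w in slug.split("-") if len(w)>2 and w not in STOP]
--
-- def _rank_by_overlap(kw, slug, pool):
--     # counting-sort ranking: one pool pass per possible overlap value, highest
--     # first -- reproduces the stable sort's tie-breaking without a sort call
--     ranked = []
--     for v in range(len(kw), 0, -1):
--         for s in pool:
--             if s != slug and len(kw & set(keywords(s))) == v:
--                 ranked.append(s)
--     return ranked
--
-- def _dedup_by_root(items):
--     seen = set()
--     picked = []
--     for s in items:
--         root = s.split("-")[0]
--         if root not in seen:
--             seen.add(root)
--             picked.append(s)
--     return picked
--
-- def _fresh_candidates(slug, chosen, pool):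
--     # distinct pool slugs other than slug and the already chosen ones, in pool order
--     extra = []
--     for s in pool:
--         if s != slug and s not in chosen and s not in extra:
--             extra.append(s)
--     return extra
--
-- def related_slugs(slug, pool, n=5):
--     kw = set(keywords(slug))
--     if not kw:
--         return pool[:n]
--     # rank, dedup the whole ranking by topic root, keep the first n (none if n <= 0)
--     result = [s for s, _ in zip(_dedup_by_root(_rank_by_overlap(kw, slug, pool)), range(n))]
--     if len(result) < n:
--         # fallback: fill the gap from the fresh candidates, in pool order
--         extra = _fresh_candidates(slug, result, pool)
--         result = result + [s for s, _ in zip(extra, range(n - len(result)))]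
--     return result
-- ===== Notes on version B (the rewrite author's own statement) =====
-- stated objective: alternative
-- what changed: B replaces A's scored-pairs list, stable sort and two break-in-the-middle loops by staged passes: counting-sort-style ranking (one pool pass per overlap value, highest first), a full dedup-by-root pass followed by taking the first n, and a fallback computed as a whole deduplicated candidate list sliced to the missing length.
-- intended difference: When n <= 0 and at least one pool slug shares a keyword with slug, A's break-after-append dedup loop still returns one slug, while B returns the empty list, which is the intended result of asking for at most n <= 0 related slugs. — e.g. on related_slugs("cat-food", (["cat-toys"], 0)): A returns ["cat-toys"], B returns []
import Mathlib
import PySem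

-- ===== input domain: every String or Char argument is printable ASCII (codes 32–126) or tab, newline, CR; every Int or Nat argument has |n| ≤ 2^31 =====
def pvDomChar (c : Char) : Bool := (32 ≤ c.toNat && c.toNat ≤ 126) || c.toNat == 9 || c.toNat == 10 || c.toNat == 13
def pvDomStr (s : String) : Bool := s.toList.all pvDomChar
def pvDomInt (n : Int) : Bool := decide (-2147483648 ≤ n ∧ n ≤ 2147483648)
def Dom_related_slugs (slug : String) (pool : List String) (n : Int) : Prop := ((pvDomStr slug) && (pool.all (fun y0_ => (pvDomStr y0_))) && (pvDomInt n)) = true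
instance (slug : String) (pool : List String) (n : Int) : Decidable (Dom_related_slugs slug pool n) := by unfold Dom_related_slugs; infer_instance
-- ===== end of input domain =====

-- B replaces the scored-list/stable-sort/break-loops pipeline by staged passes (counting-sort
-- ranking, a full dedup then a prefix, a whole fallback list then a prefix); objective: alternative.

-- ===== PORT A =====
-- shared module constant STOP (only membership is used)
def STOPL : List String :=
  ["san","diego","for","to","the","a","an","of","in","is","how","do","i","my",
   "near","me","so","why","what","when","get","be","not","are","with","on","at"]

-- keywords(slug) — helper shared by both Pythons verbatim
def keywordsP (s : String) : List String :=
  ((PySem.Str.split? s "-").getD []).filter (fun w => decide (2 < PySem.Str.len w) && !(STOPL.contains w))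

-- len(kw & set(keywords(s))) — appears identically in both Pythons
def ovCount (kw : PySem.Set String) (s : String) : Int :=
  PySem.Set.len (PySem.Set.inter kw (PySem.Set.ofList (keywordsP s)))

-- A's dedup-by-root loop over the sorted (overlap, slug) pairs, with the break
def dedupLoopA (n : Int) : List (Int × String) → PySem.Set String → List String → List String
  | [], _, result => result
  | (_, s) :: rest, seen, result =>
    -- s.split("-")[0]: splitOn never returns [], so index 0 is the head
    let root := ((PySem.Str.split? s "-").getD []).headD ""
    let p := if !(PySem.Set.contains seen root) then
               (PySem.Set.add seen root, result ++ [s]) else (seen, result)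
    if n ≤ (p.2.length : Int) then p.2 else dedupLoopA n rest p.1 p.2

-- A's fallback fill loop, with the break
def fillLoop (slug : String) (n : Int) : List String → List String → List String
  | [], result => result
  | s :: rest, result =>
    let result := if !(result.contains s) && !(s == slug) then result ++ [s] else result
    if n ≤ (result.length : Int) then result else fillLoop slug n rest result

def related_slugs (slug : String) (pool : List String) (n : Int) : List String :=
  let kw := PySem.Set.ofList (keywordsP slug)
  if kw = [] then PySem.List.slice pool none (some n)
  else
    let scored := pool.foldl (fun acc s =>
        if s = slug then acc
        else
          let overlap := ovCount kw s
          if 0 < overlap then acc ++ [(overlap, s)] else acc) []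
    let sortedScored := PySem.List.sorted scored (fun x => -x.1) false
    let result := dedupLoopA n sortedScored PySem.Set.empty []
    if (result.length : Int) < n then fillLoop slug n pool result else result

-- ===== PORT B =====
-- counting-sort ranking: one pool pass per overlap value, highest first
def rankByOverlap (kw : PySem.Set String) (slug : String) (pool : List String) : List String :=
  (PySem.List.pyRange (PySem.Set.len kw) 0 (-1)).foldl
    (fun acc v => pool.foldl (fun acc s =>
        if !(s == slug) && (ovCount kw s == v) then acc ++ [s] else acc) acc) []

-- dedup a whole list by topic root, first occurrence per root
def dedupByRoot (items : List String) : List String :=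
  (items.foldl (fun (st : PySem.Set String × List String) s =>
      let root := ((PySem.Str.split? s "-").getD []).headD ""
      if PySem.Set.contains st.1 root then st else (PySem.Set.add st.1 root, st.2 ++ [s]))
    (PySem.Set.empty, [])).2

-- distinct pool slugs other than slug and the chosen ones, in pool order
def freshCandidates (slug : String) (chosen : List String) (pool : List String) : List String :=
  pool.foldl (fun extra s =>
      if !(s == slug) && !(chosen.contains s) && !(extra.contains s) then extra ++ [s] else extra) []

def related_slugs_alt (slug : String) (pool : List String) (n : Int) : List String :=
  let kw := PySem.Set.ofList (keywordsP slug)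
  if kw = [] then PySem.List.slice pool none (some n)
  else
    -- [s for s, _ in zip(…, range(n))] = the first n elements, none when n ≤ 0; exact
    let result := (dedupByRoot (rankByOverlap kw slug pool)).take n.toNat
    if (result.length : Int) < n then
      result ++ (freshCandidates slug result pool).take (n - result.length).toNat
    else result

-- ===== PRECONDITION & SPEC =====
-- When n ≤ 0 and some pool slug shares a keyword with slug, A's break-after-append dedup loop
-- still returns one slug, while B returns [], the intended result of asking for ≤ 0 slugs.
def D_related_slugs (slug : String) (pool : List String) (n : Int) : Prop :=
  n ≤ 0 ∧ PySem.Set.ofList (keywordsP slug) ≠ [] ∧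
    ∃ s ∈ pool, s ≠ slug ∧ 0 < ovCount (PySem.Set.ofList (keywordsP slug)) s
instance (slug : String) (pool : List String) (n : Int) : Decidable (D_related_slugs slug pool n) := by unfold D_related_slugs; infer_instance

def Spec_related_slugs (slug : String) (pool : List String) (n : Int) (out : List String) : Prop := ¬ D_related_slugs slug pool n → out = related_slugs_alt slug pool n
instance (slug : String) (pool : List String) (n : Int) (out : List String) : Decidable (Spec_related_slugs slug pool n out) := by unfold Spec_related_slugs; infer_instance

def pvDiffWitness_related_slugs : String × List String × Int := ("cat-food", (["cat-toys"], 0))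
def pvDiffWitnessOut_related_slugs : (List String) × (List String) := (["cat-toys"], [])

-- ===== CLAIM (what is proved, stated in full; the proofs are below) =====
def Claim_unchanged_related_slugs : Prop := ∀ (slug : String) (pool : List String) (n : Int), Dom_related_slugs slug pool n → Spec_related_slugs slug pool n (related_slugs slug pool n)
def Claim_changed_related_slugs : Prop := Dom_related_slugs (pvDiffWitness_related_slugs.1) (pvDiffWitness_related_slugs.2.1) (pvDiffWitness_related_slugs.2.2) ∧ D_related_slugs (pvDiffWitness_related_slugs.1) (pvDiffWitness_related_slugs.2.1) (pvDiffWitness_related_slugs.2.2) ∧ related_slugs (pvDiffWitness_related_slugs.1) (pvDiffWitness_related_slugs.2.1) (pvDiffWitness_related_slugs.2.2) = pvDiffWitnessOut_related_slugs.1 ∧ related_slugs_alt (pvDiffWitness_related_slugs.1) (pvDiffWitness_related_slugs.2.1) (pvDiffWitness_related_slugs.2.2) = pvDiffWitnessOut_related_slugs.2 ∧ pvDiffWitnessOut_related_slugs.1 ≠ pvDiffWitnessOut_related_slugs.2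
def Claim_exact_related_slugs : Prop := ∀ (slug : String) (pool : List String) (n : Int), Dom_related_slugs slug pool n → D_related_slugs slug pool n → related_slugs slug pool n ≠ related_slugs_alt slug pool n

-- ===== LEMMAS AND PROOFS =====

-- the nice recursive forms of the dedup/fill traversals, shared by the two ports' loop lemmas
def dedupRec : PySem.Set String → List String → List String
  | _, [] => []
  | seen, s :: rest =>
    let root := ((PySem.Str.split? s "-").getD []).headD ""
    if PySem.Set.contains seen root then dedupRec seen rest
    else s :: dedupRec (PySem.Set.add seen root) rest

def fillRec (slug : String) : List String → List String → List String
  | _, [] => []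
  | excl, s :: rest =>
    if !(s == slug) && !(excl.contains s) then s :: fillRec slug (excl ++ [s]) rest
    else fillRec slug excl rest

-- A's dedup loop = dedup everything, then take the first (n - |result|)   (needs |result| < n)
theorem dedupA_take (n : Int) : ∀ (ps : List (Int × String)) (seen : PySem.Set String) (res : List String),
    (res.length : Int) < n →
    dedupLoopA n ps seen res = res ++ (dedupRec seen (ps.map (fun q => q.2))).take (n - res.length).toNat := by
  intro ps
  induction ps with
  | nil => intro seen res h; simp [dedupLoopA, dedupRec]
  | cons p rest ih =>
    intro seen res h
    obtain ⟨o, s⟩ := p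
    simp only [dedupLoopA, List.map_cons, dedupRec]
    by_cases hr : PySem.Set.contains seen (((PySem.Str.split? s "-").getD []).headD "") = true
    · simp only [hr, Bool.not_true, Bool.false_eq_true, if_false, if_true]
      have hbr : ¬ (n ≤ ((res.length : Nat) : Int)) := by omega
      rw [if_neg hbr, ih seen res h]
    · rw [Bool.not_eq_true] at hr
      simp only [hr, Bool.not_false, Bool.false_eq_true, if_false, if_true]
      by_cases hb : n ≤ (((res ++ [s]).length : Nat) : Int)
      · rw [if_pos hb]
        have ht : (n - (res.length : Int)).toNat = 1 := by
          simp only [List.length_append, List.length_cons, List.length_nil] at hb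
          omega
        rw [ht]
        simp
      · rw [if_neg hb, ih _ _ (by simp only [List.length_append, List.length_cons, List.length_nil] at hb ⊢; omega)]
        have ht : (n - (res.length : Int)).toNat = (n - ((res ++ [s]).length : Int)).toNat + 1 := by
          simp only [List.length_append, List.length_cons, List.length_nil] at hb ⊢
          omega
        rw [ht, List.take_succ_cons]
        simp

-- B's dedup fold computes dedupRec
theorem dedupB_fold : ∀ (xs : List String) (seen : PySem.Set String) (acc : List String),
    (xs.foldl (fun (st : PySem.Set String × List String) s =>
        let root := ((PySem.Str.split? s "-").getD []).headD ""
        if PySem.Set.contains st.1 root then st else (PySem.Set.add st.1 root, st.2 ++ [s]))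
      (seen, acc)).2 = acc ++ dedupRec seen xs := by
  intro xs
  induction xs with
  | nil => intro seen acc; simp [dedupRec]
  | cons s rest ih =>
    intro seen acc
    simp only [List.foldl_cons, dedupRec]
    by_cases hr : PySem.Set.contains seen (((PySem.Str.split? s "-").getD []).headD "") = true
    · simp only [hr, if_true]; rw [ih]
    · rw [Bool.not_eq_true] at hr
      simp only [hr, Bool.false_eq_true, if_false]
      rw [ih]
      simp

-- A's fill loop = filter-and-dedup everything, then take the first (n - |result|)
theorem fillA_take (slug : String) (n : Int) : ∀ (xs : List String) (res : List String),
    (res.length : Int) < n →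
    fillLoop slug n xs res = res ++ (fillRec slug res xs).take (n - res.length).toNat := by
  intro xs
  induction xs with
  | nil => intro res h; simp [fillLoop, fillRec]
  | cons s rest ih =>
    intro res h
    simp only [fillLoop, fillRec]
    by_cases hc : (!(res.contains s) && !(s == slug)) = true
    · have hc' : (!(s == slug) && !(res.contains s)) = true := by
        rw [Bool.and_comm] at hc; exact hc
      simp only [hc, hc', if_true]
      by_cases hb : n ≤ (((res ++ [s]).length : Nat) : Int)
      · rw [if_pos hb]
        have ht : (n - (res.length : Int)).toNat = 1 := by
          simp only [List.length_append, List.length_cons, List.length_nil] at hb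
          omega
        rw [ht]
        simp
      · rw [if_neg hb, ih _ (by simp only [List.length_append, List.length_cons, List.length_nil] at hb ⊢; omega)]
        have ht : (n - (res.length : Int)).toNat = (n - ((res ++ [s]).length : Int)).toNat + 1 := by
          simp only [List.length_append, List.length_cons, List.length_nil] at hb ⊢
          omega
        rw [ht, List.take_succ_cons]
        simp
    · have hc' : (!(s == slug) && !(res.contains s)) = false := by
        rw [Bool.and_comm] at hc; simpa using hc
      rw [Bool.not_eq_true] at hc
      simp only [hc, hc', Bool.false_eq_true, if_false]
      have hbr : ¬ (n ≤ ((res.length : Nat) : Int)) := by omega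
      rw [if_neg hbr, ih res h]

-- B's fallback fold computes fillRec (exclusion list = result ++ accumulated extras)
theorem fillB_fold (slug : String) (result : List String) :
    ∀ (xs : List String) (extra : List String),
    xs.foldl (fun extra s =>
        if !(s == slug) && !(result.contains s) && !(extra.contains s) then extra ++ [s] else extra)
      extra = extra ++ fillRec slug (result ++ extra) xs := by
  intro xs
  induction xs with
  | nil => intro extra; simp [fillRec]
  | cons s rest ih =>
    intro extra
    simp only [List.foldl_cons, fillRec, List.contains_append]
    cases hs : (s == slug)
    · cases h1 : result.contains s
      · cases h2 : extra.contains s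
        · simp only [hs, h1, h2, Bool.not_false, Bool.true_and, Bool.and_true, Bool.or_self,
            if_true, ih (extra ++ [s])]
          simp [List.append_assoc]
        · simp only [hs, h1, h2, Bool.not_false, Bool.not_true, Bool.true_and, Bool.and_false,
            Bool.false_or, Bool.false_eq_true, if_false, ih extra]
      · simp only [hs, h1, Bool.not_false, Bool.not_true, Bool.true_and, Bool.false_and,
          Bool.and_false, Bool.true_or, Bool.false_eq_true, if_false, ih extra]
    · simp only [hs, Bool.not_true, Bool.false_and, Bool.false_eq_true, if_false, ih extra]

theorem flatMap_congr {α β : Type} (f g : α → List β) :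
    ∀ (l : List α), (∀ x ∈ l, f x = g x) → l.flatMap f = l.flatMap g := by
  intro l
  induction l with
  | nil => intro _; rfl
  | cons x t ih =>
    intro h
    simp only [List.flatMap_cons]
    rw [h x (by simp), ih (fun y hy => h y (by simp [hy]))]

theorem insertBy_append_not {α : Type} (before : α → α → Bool) (x : α) :
    ∀ (ys zs : List α), (∀ y ∈ ys, before x y = false) →
      PySem.List.insertBy before x (ys ++ zs) = ys ++ PySem.List.insertBy before x zs := by
  intro ys
  induction ys with
  | nil => intro zs _; simp
  | cons y ys ih =>
    intro zs h
    have hy := h y (by simp)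
    simp only [List.cons_append, PySem.List.insertBy, hy]
    simp [ih zs (fun z hz => h z (by simp [hz]))]

theorem insertBy_cons_all {α : Type} (before : α → α → Bool) (x : α) (zs : List α)
    (h : ∀ y ∈ zs, before x y = true) : PySem.List.insertBy before x zs = x :: zs := by
  cases zs with
  | nil => rfl
  | cons y t => have := h y (by simp); simp [PySem.List.insertBy, this]

theorem ins_flatMap (p : Int × String) :
    ∀ (ks : List Int) (ps : List (Int × String)),
    ks.Pairwise (fun a b => b < a) → p.1 ∈ ks → (∀ q ∈ ps, q.1 ∈ ks) →
    PySem.List.insertBy (fun a b => decide ((-a.1 : Int) < -b.1)) p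
        (ks.flatMap (fun v => ps.filter (fun q => q.1 == v)))
      = ks.flatMap (fun v => (ps ++ [p]).filter (fun q => q.1 == v)) := by
  intro ks
  induction ks with
  | nil => intro ps _ hp _; simp at hp
  | cons k ks ih =>
    intro ps hks hp hps
    have hklt : ∀ v ∈ ks, v < k := fun v hv => (List.pairwise_cons.mp hks).1 v hv
    simp only [List.flatMap_cons]
    by_cases hpk : p.1 = k
    · have h1 : ∀ y ∈ ps.filter (fun q => q.1 == k),
          (fun a b => decide ((-a.1 : Int) < -b.1)) p y = false := by
        intro y hy
        have h := (List.mem_filter.mp hy).2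
        simp only [beq_iff_eq] at h
        simp [h, hpk]
      have h2 : ∀ y ∈ ks.flatMap (fun v => ps.filter (fun q => q.1 == v)),
          (fun a b => decide ((-a.1 : Int) < -b.1)) p y = true := by
        intro y hy
        simp only [List.mem_flatMap, List.mem_filter, beq_iff_eq] at hy
        obtain ⟨v, hv, _, hyv⟩ := hy
        have := hklt v hv
        simp only [decide_eq_true_eq]
        omega
      rw [insertBy_append_not _ _ _ _ h1, insertBy_cons_all _ _ _ h2]
      have h3 : (ps ++ [p]).filter (fun q => q.1 == k) = ps.filter (fun q => q.1 == k) ++ [p] := by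
        simp [List.filter_append, hpk]
      have h4 : ks.flatMap (fun v => (ps ++ [p]).filter (fun q => q.1 == v))
          = ks.flatMap (fun v => ps.filter (fun q => q.1 == v)) := by
        apply flatMap_congr
        intro v hv
        have hvk := hklt v hv
        have : (p.1 == v) = false := by simp; omega
        simp [List.filter_append, this]
      rw [h3, h4]
      simp
    · have hp' : p.1 ∈ ks := by
        rcases List.mem_cons.mp hp with h | h
        · exact absurd h hpk
        · exact h
      have hpk' : p.1 < k := hklt _ hp'
      have h1 : ∀ y ∈ ps.filter (fun q => q.1 == k),
          (fun a b => decide ((-a.1 : Int) < -b.1)) p y = false := by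
        intro y hy
        have h := (List.mem_filter.mp hy).2
        simp only [beq_iff_eq] at h
        simp only [decide_eq_false_iff_not]
        omega
      rw [insertBy_append_not _ _ _ _ h1]
      have hblocks : ∀ v ∈ ks, ps.filter (fun q => q.1 == v)
          = (ps.filter (fun q => !(q.1 == k))).filter (fun q => q.1 == v) := by
        intro v hv
        have hvk := hklt v hv
        rw [List.filter_filter]
        apply List.filter_congr
        intro q _
        by_cases hq : q.1 = v
        · simp [hq]
          omega
        · simp [hq]
      have hblocks2 : ∀ v ∈ ks, (ps ++ [p]).filter (fun q => q.1 == v)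
          = ((ps.filter (fun q => !(q.1 == k))) ++ [p]).filter (fun q => q.1 == v) := by
        intro v hv
        rw [List.filter_append, List.filter_append, ← hblocks v hv]
      have hk1 : (ps ++ [p]).filter (fun q => q.1 == k) = ps.filter (fun q => q.1 == k) := by
        have : (p.1 == k) = false := by simp [hpk]
        simp [List.filter_append, this]
      rw [hk1, flatMap_congr _ _ ks hblocks, flatMap_congr _ _ ks hblocks2]
      have hmem' : ∀ q ∈ ps.filter (fun q => !(q.1 == k)), (q : Int × String).1 ∈ ks := by
        intro q hq
        obtain ⟨hq1, hq2⟩ := List.mem_filter.mp hq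
        have := hps q hq1
        rcases List.mem_cons.mp this with h | h
        · simp [h] at hq2
        · exact h
      rw [ih (ps.filter (fun q => !(q.1 == k))) (List.pairwise_cons.mp hks).2 hp' hmem']

theorem sorted_flatMap (ks : List Int) (hks : ks.Pairwise (fun a b => b < a)) :
    ∀ ps : List (Int × String), (∀ q ∈ ps, q.1 ∈ ks) →
    PySem.List.sorted ps (fun x => (-x.1 : Int)) false
      = ks.flatMap (fun v => ps.filter (fun q => q.1 == v)) := by
  intro ps
  induction ps using List.reverseRecOn with
  | nil => intro _; simp [PySem.List.sorted_eq_foldl_insertBy]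
  | append_singleton ps p ih =>
    intro hmem
    rw [PySem.List.sorted_eq_foldl_insertBy, List.foldl_append]
    simp only [List.foldl_cons, List.foldl_nil]
    rw [← PySem.List.sorted_eq_foldl_insertBy, ih (fun q hq => hmem q (by simp [hq]))]
    exact ins_flatMap p ks ps hks (hmem p (by simp)) (fun q hq => hmem q (by simp [hq]))

theorem pyRange_neg_pairwise (M : Int) :
    (PySem.List.pyRange M 0 (-1)).Pairwise (fun a b => b < a) := by
  rw [PySem.List.pyRange_neg_one]
  rw [List.pairwise_map]
  apply List.Pairwise.imp ?_ (List.pairwise_lt_range)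
  intro a b h
  omega

theorem ovCount_le (kw : PySem.Set String) (s : String) : ovCount kw s ≤ PySem.Set.len kw := by
  simp only [ovCount, PySem.Set.len, PySem.Set.inter]
  exact_mod_cast List.length_filter_le _ _

theorem scoredEq (kw : PySem.Set String) (slug : String) :
    ∀ (pool : List String) (acc : List (Int × String)),
    pool.foldl (fun acc s =>
        if s = slug then acc
        else
          let overlap := ovCount kw s
          if 0 < overlap then acc ++ [(overlap, s)] else acc) acc
      = acc ++ (pool.filter (fun s => !(s == slug) && decide (0 < ovCount kw s))).map
          (fun s => (ovCount kw s, s)) := by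
  intro pool
  induction pool with
  | nil => intro acc; simp
  | cons s rest ih =>
    intro acc
    simp only [List.foldl_cons, List.filter_cons]
    by_cases h : s = slug
    · simp [h, ih]
    · by_cases h2 : 0 < ovCount kw s
      · simp [h, h2, ih]
      · simp [h, h2, ih]

theorem rankedInner (kw : PySem.Set String) (slug : String) (v : Int) :
    ∀ (pool : List String) (acc : List String),
    pool.foldl (fun acc s =>
        if !(s == slug) && (ovCount kw s == v) then acc ++ [s] else acc) acc
      = acc ++ pool.filter (fun s => !(s == slug) && (ovCount kw s == v)) := by
  intro pool
  induction pool with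
  | nil => intro acc; simp
  | cons s rest ih =>
    intro acc
    by_cases h : (!(s == slug) && (ovCount kw s == v)) = true
    · simp only [List.foldl_cons, List.filter_cons, h, if_true]
      rw [ih]
      simp
    · rw [Bool.not_eq_true] at h
      simp only [List.foldl_cons, List.filter_cons, h, Bool.false_eq_true, if_false]
      exact ih acc

theorem mapsnd_block (kw : PySem.Set String) (slug : String) (v : Int) (hv : 0 < v)
    (pool : List String) :
    ((((pool.filter (fun s => !(s == slug) && decide (0 < ovCount kw s))).map
        (fun s => (ovCount kw s, s))).filter (fun q => q.1 == v)).map (fun q => q.2))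
      = pool.filter (fun s => !(s == slug) && (ovCount kw s == v)) := by
  rw [List.filter_map, List.map_map]
  have hid : ((fun q : Int × String => q.2) ∘ fun s => (ovCount kw s, s)) = id := rfl
  rw [hid, List.map_id, List.filter_filter]
  apply List.filter_congr
  intro s _
  by_cases h : ovCount kw s = v
  · simp [h, hv]
  · have : (ovCount kw s == v) = false := by simp [h]
    simp [this]

theorem rank_eq (kw : PySem.Set String) (slug : String) (pool : List String) :
    rankByOverlap kw slug pool = (PySem.List.pyRange (PySem.Set.len kw) 0 (-1)).flatMap
      (fun v => pool.filter (fun s => !(s == slug) && (ovCount kw s == v))) := by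
  unfold rankByOverlap
  have hstep : (fun (acc : List String) (v : Int) => pool.foldl (fun acc s =>
        if !(s == slug) && (ovCount kw s == v) then acc ++ [s] else acc) acc)
      = (fun acc v => acc ++ pool.filter (fun s => !(s == slug) && (ovCount kw s == v))) := by
    funext acc v
    exact rankedInner kw slug v pool acc
  rw [hstep, PySem.List.foldl_append_eq_flatMap]
  simp

theorem dedup_eq : ∀ (items : List String), dedupByRoot items = dedupRec PySem.Set.empty items := by
  intro items
  unfold dedupByRoot
  rw [dedupB_fold]
  simp

theorem fresh_eq (slug : String) (pool : List String) : ∀ (chosen : List String),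
    freshCandidates slug chosen pool = fillRec slug chosen pool := by
  intro chosen
  unfold freshCandidates
  rw [fillB_fold]
  simp

-- ===== VERDICT (by name: the statement is the Claim_ definition above) =====
set_option maxHeartbeats 1600000 in
theorem related_slugs_spec : Claim_unchanged_related_slugs := by
  unfold Claim_unchanged_related_slugs Spec_related_slugs
  intro slug pool n _ hD
  by_cases hkw : PySem.Set.ofList (keywordsP slug) = []
  · simp [related_slugs, related_slugs_alt, hkw]
  · simp only [related_slugs, related_slugs_alt, if_neg hkw]
    set kw := PySem.Set.ofList (keywordsP slug) with hkwdef
    set P := fun s => !(s == slug) && decide (0 < ovCount kw s) with hP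
    set ks := PySem.List.pyRange (PySem.Set.len kw) 0 (-1) with hks
    have hscored := scoredEq kw slug pool []
    rw [hscored]
    simp only [List.nil_append]
    have hmem : ∀ q ∈ (pool.filter P).map (fun s => (ovCount kw s, s)), (q : Int × String).1 ∈ ks := by
      intro q hq
      obtain ⟨s, hs, rfl⟩ := List.mem_map.mp hq
      have hfs := (List.mem_filter.mp hs).2
      rw [hP] at hfs
      simp only [Bool.and_eq_true, decide_eq_true_eq] at hfs
      rw [hks]
      exact PySem.List.mem_pyRange_neg_one.mpr ⟨hfs.2, ovCount_le kw s⟩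
    rw [sorted_flatMap ks (by rw [hks]; exact pyRange_neg_pairwise _) _ hmem]
    have hsnd : (ks.flatMap (fun v => ((pool.filter P).map
          (fun s => (ovCount kw s, s))).filter (fun q => q.1 == v))).map (fun q => q.2)
        = ks.flatMap (fun v => pool.filter (fun s => !(s == slug) && (ovCount kw s == v))) := by
      rw [List.map_flatMap]
      apply flatMap_congr
      intro v hv
      have hv0 : 0 < v := (PySem.List.mem_pyRange_neg_one.mp (hks ▸ hv)).1
      exact mapsnd_block kw slug v hv0 pool
    have hrk : rankByOverlap kw slug pool
        = ks.flatMap (fun v => pool.filter (fun s => !(s == slug) && (ovCount kw s == v))) := by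
      rw [hks]
      exact rank_eq kw slug pool
    rw [hrk, dedup_eq]
    by_cases hn : 0 < n
    · rw [dedupA_take n _ _ _ (by simpa using hn)]
      simp only [List.nil_append, List.length_nil, Nat.cast_zero, Int.sub_zero]
      rw [hsnd]
      by_cases hlt : ((((dedupRec PySem.Set.empty (ks.flatMap (fun v => pool.filter
          (fun s => !(s == slug) && (ovCount kw s == v))))).take n.toNat).length : Nat) : Int) < n
      · rw [if_pos hlt, if_pos hlt, fillA_take slug n pool _ hlt, fresh_eq]
      · rw [if_neg hlt, if_neg hlt]
    · -- n ≤ 0: outside D_ this means no pool slug overlaps, so both sides are []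
      have hno : ∀ s ∈ pool, ¬ (s ≠ slug ∧ 0 < ovCount kw s) := by
        intro s hs hctr
        exact hD ⟨by omega, hkw, s, hs, hctr⟩
      have hfilter : pool.filter P = [] := by
        rw [List.filter_eq_nil_iff]
        intro s hs
        rw [hP]
        by_cases h1 : s = slug
        · simp [h1]
        · have hov : ¬ (0 < ovCount kw s) := fun hov => hno s hs ⟨h1, hov⟩
          simp [h1, hov]
      have hFMstr : ks.flatMap (fun v => pool.filter (fun s => !(s == slug) && (ovCount kw s == v)))
          = ks.flatMap (fun _ => ([] : List String)) := by
        apply flatMap_congr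
        intro v hv
        have hv0 : 0 < v := (PySem.List.mem_pyRange_neg_one.mp (hks ▸ hv)).1
        rw [List.filter_eq_nil_iff]
        intro s hs
        by_cases h1 : s = slug
        · simp [h1]
        · have hov : ¬ (0 < ovCount kw s) := fun hov => hno s hs ⟨h1, hov⟩
          have hne : ovCount kw s ≠ v := by omega
          simp [h1, hne]
      have hconstnil : ∀ (l : List Int), l.flatMap (fun _ => ([] : List String)) = [] := by
        intro l
        induction l with
        | nil => rfl
        | cons a t iht => simp only [List.flatMap_cons, List.nil_append, iht]
      have hconstnil2 : ∀ (l : List Int), l.flatMap (fun _ => ([] : List (Int × String))) = [] := by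
        intro l
        induction l with
        | nil => rfl
        | cons a t iht => simp only [List.flatMap_cons, List.nil_append, iht]
      rw [hfilter]
      simp only [List.map_nil, List.filter_nil]
      rw [hFMstr, hconstnil, hconstnil2]
      simp only [dedupLoopA, dedupRec, List.take_nil, List.length_nil, Nat.cast_zero]
      have hn0 : ¬ ((0 : Int) < n) := by omega
      simp [hn0]

theorem related_slugs_changed : Claim_changed_related_slugs := by
  unfold Claim_changed_related_slugs
  refine ⟨by decide, by decide, by decide, by decide, by decide⟩

set_option maxHeartbeats 1600000 in
theorem related_slugs_tight : Claim_exact_related_slugs := by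
  unfold Claim_exact_related_slugs
  intro slug pool n _ hD
  obtain ⟨hn, hkw, s0, hs0mem, hs0ne, hs0ov⟩ := hD
  simp only [related_slugs, related_slugs_alt, if_neg hkw]
  set kw := PySem.Set.ofList (keywordsP slug) with hkwdef
  -- B returns []: take n.toNat = take 0
  have hton : n.toNat = 0 := by omega
  rw [hton]
  simp only [List.take_zero, List.length_nil, Nat.cast_zero]
  have h0 : ¬ ((0 : Int) < n) := by omega
  rw [if_neg h0]
  -- A returns a nonempty list
  have hscored := scoredEq kw slug pool []
  rw [hscored]
  simp only [List.nil_append]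
  set P := fun s => !(s == slug) && decide (0 < ovCount kw s) with hP
  have hfne : pool.filter P ≠ [] := by
    intro hctr
    have : s0 ∈ pool.filter P := by
      rw [List.mem_filter, hP]
      refine ⟨hs0mem, ?_⟩
      simp only [Bool.and_eq_true, Bool.not_eq_true', beq_eq_false_iff_ne, decide_eq_true_eq]
      exact ⟨hs0ne, hs0ov⟩
    rw [hctr] at this
    simp at this
  have hsne : PySem.List.sorted ((pool.filter P).map (fun s => (ovCount kw s, s)))
      (fun x => (-x.1 : Int)) false ≠ [] := by
    rw [Ne, PySem.List.sorted_eq_nil_iff]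
    simp [hfne]
  cases hS : PySem.List.sorted ((pool.filter P).map (fun s => (ovCount kw s, s)))
      (fun x => (-x.1 : Int)) false with
  | nil => exact absurd hS hsne
  | cons p rest =>
    obtain ⟨o, s⟩ := p
    have hcont : PySem.Set.contains PySem.Set.empty
        (((PySem.Str.split? s "-").getD []).headD "") = false := by
      simp [PySem.Set.contains, PySem.Set.empty]
    simp only [dedupLoopA, hcont, Bool.not_false, if_true, List.nil_append]
    have hb : n ≤ ((([s] : List String).length : Nat) : Int) := by
      simp only [List.length_cons, List.length_nil]
      omega
    rw [if_pos hb]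
    have hlt : ¬ (((([s] : List String).length : Nat) : Int) < n) := by
      simp only [List.length_cons, List.length_nil]
      omega
    rw [if_neg hlt]
    simp
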